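-- pv_equiv track=rewrite | github.com/BalazsFarkas25/FitMySize | Application/app/helpers/evaluation.py | find_max_subarray_with_elements_ge_1
-- ===== SOURCE A (Python) =====
-- def find_max_subarray_with_elements_ge_1(arr, max_zero_tolerance = 3):
--     tolerance = max_zero_tolerance
--     max_start = 0
--     max_len = 0
--
--     current_start = 0
--     current_len = 0
--
--     for i in range(len(arr)):
--         if (arr[i] >= 1):
--             if current_len == 0:
--                 current_start = i
--             current_len += 1
--         elif (arr[i]>=-2 and tolerance != 0):
--             tolerance-= 1
--             if current_len == 0:
--                 current_start = i
--             current_len += 1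
--         else:
--             tolerance = max_zero_tolerance
--             if current_len > max_len:
--                 max_len = current_len
--                 max_start = current_start
--             current_len = 0
--
--     # Check the last subarray
--     if current_len > max_len:
--         max_len = current_len
--         max_start = current_start
--
--     return list(range(max_start,max_start+max_len+1))
-- ===== SOURCE B (Python) =====
-- def find_max_subarray_with_elements_ge_1(arr, max_zero_tolerance=3):
--     # Event-jump algorithm: classify indices once into "bad" (< -3 is impossible;
--     # x < -2 always breaks) and "low" (-2..0, consumes tolerance), then jump from
--     # break to break arithmetically instead of running a per-element state machine:
--     # a segment starting at s ends at the first bad index >= s or at the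
--     # (max_zero_tolerance+1)-th low index >= s, whichever comes first.
--     n = len(arr)
--     bads = [i for i, x in enumerate(arr) if x < -2]
--     lows = [i for i, x in enumerate(arr) if -2 <= x <= 0]
--     best_start, best_len = 0, 0
--     s = 0
--     while True:
--         nb = bads[0] if bads else n
--         nl = lows[max_zero_tolerance] if 0 <= max_zero_tolerance < len(lows) else n
--         e = min(nb, nl)
--         if e - s > best_len:
--             best_start, best_len = s, e - s
--         if e >= n:
--             break
--         s = e + 1
--         bads = [i for i in bads if i >= s]
--         lows = [i for i in lows if i >= s]
--     return list(range(best_start, best_start + best_len + 1))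
-- ===== Notes on version B (the rewrite author's own statement) =====
-- stated objective: alternative
-- what changed: Replaces A's per-element tolerance state machine by an event-jump algorithm: classify indices once into 'bad' (< -3 ... x < -2, always breaks) and 'low' (-2..0, consumes tolerance) index lists, then compute each maximal segment's end arithmetically as min(first bad index, (tolerance+1)-th low index) and jump from break to break, keeping the best (start,length).
import Mathlib
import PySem

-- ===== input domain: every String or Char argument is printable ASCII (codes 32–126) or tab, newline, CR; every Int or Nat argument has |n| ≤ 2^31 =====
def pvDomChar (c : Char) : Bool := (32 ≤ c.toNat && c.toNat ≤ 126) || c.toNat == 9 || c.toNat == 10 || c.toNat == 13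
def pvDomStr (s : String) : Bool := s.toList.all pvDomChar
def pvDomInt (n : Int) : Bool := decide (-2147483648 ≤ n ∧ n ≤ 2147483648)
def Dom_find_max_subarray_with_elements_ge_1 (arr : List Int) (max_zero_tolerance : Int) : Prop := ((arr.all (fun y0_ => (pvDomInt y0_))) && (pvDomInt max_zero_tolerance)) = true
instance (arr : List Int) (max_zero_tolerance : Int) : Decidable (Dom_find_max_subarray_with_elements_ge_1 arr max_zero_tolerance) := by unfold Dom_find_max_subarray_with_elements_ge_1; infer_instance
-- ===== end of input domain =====

-- B replaces A's per-element tolerance state machine by an event-jump algorithm: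
-- classify indices once into "bad" and "low" lists, then jump from break to break
-- arithmetically (objective: alternative; same return value everywhere).

-- ===== PORT A =====
-- state: (tolerance, max_start, max_len, current_start, current_len)
def stepA (max_zero_tolerance : Int) (st : Int × Int × Int × Int × Int) (p : Int × Int) :
    Int × Int × Int × Int × Int :=
  let (tol, ms, ml, cs, cl) := st
  let (i, x) := p
  if x ≥ 1 then
    (tol, ms, ml, if cl = 0 then i else cs, cl + 1)
  else if x ≥ -2 ∧ tol ≠ 0 then
    (tol - 1, ms, ml, if cl = 0 then i else cs, cl + 1)
  else
    (max_zero_tolerance, if cl > ml then cs else ms, if cl > ml then cl else ml, cs, 0)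

def find_max_subarray_with_elements_ge_1 (arr : List Int) (max_zero_tolerance : Int) : List Int :=
  let st := (PySem.List.enumerate arr).foldl (stepA max_zero_tolerance)
      (max_zero_tolerance, 0, 0, 0, 0)
  let (_, ms, ml, cs, cl) := st
  -- Check the last subarray
  let ms := if cl > ml then cs else ms
  let ml := if cl > ml then cl else ml
  PySem.List.pyRange ms (ms + ml + 1) 1

-- ===== PORT B =====
-- B-side helper: the next break position from s (the lists hold only indices ≥ s):
-- nb = bads[0] if bads else n; nl = lows[mzt] if 0 <= mzt < len(lows) else n; e = min(nb, nl)
def nextBreak (n mzt : Int) (bads lows : List Int) : Int :=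
  min (bads.headD n)
      (if 0 ≤ mzt ∧ mzt < (lows.length : Int) then PySem.List.pyGetD lows mzt n else n)

-- the while-True jump loop of Source B (fuel is only a totality guard; the caller
-- passes enough fuel for every break, so the 0-case is never reached)
def goB : Nat → Int → Int → List Int → List Int → Int → Int × Int → Int × Int
  | 0, _, _, _, _, _, best => best
  | fuel + 1, n, mzt, bads, lows, s, best =>
    let e := nextBreak n mzt bads lows
    let best' := if e - s > best.2 then (s, e - s) else best
    if e ≥ n then best'
    else
      goB fuel n mzt (bads.filter (fun i => decide (i ≥ e + 1)))
        (lows.filter (fun i => decide (i ≥ e + 1))) (e + 1) best'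

def find_max_subarray_with_elements_ge_1_alt (arr : List Int) (max_zero_tolerance : Int) : List Int :=
  let n : Int := arr.length
  let bads := ((PySem.List.enumerate arr).filter (fun p => decide (p.2 < -2))).map (fun p => p.1)
  let lows := ((PySem.List.enumerate arr).filter (fun p => decide (-2 ≤ p.2 ∧ p.2 ≤ 0))).map (fun p => p.1)
  let best := goB (bads.length + lows.length + 1) n max_zero_tolerance bads lows 0 (0, 0)
  PySem.List.pyRange best.1 (best.1 + best.2 + 1) 1

-- ===== PRECONDITION & SPEC =====
def Spec_find_max_subarray_with_elements_ge_1 (arr : List Int) (max_zero_tolerance : Int) (out : List Int) : Prop := out = find_max_subarray_with_elements_ge_1_alt arr max_zero_tolerance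
instance (arr : List Int) (max_zero_tolerance : Int) (out : List Int) : Decidable (Spec_find_max_subarray_with_elements_ge_1 arr max_zero_tolerance out) := by unfold Spec_find_max_subarray_with_elements_ge_1; infer_instance

-- ===== CLAIM (what is proved, stated in full; the proofs are below) =====
def Claim_equal_find_max_subarray_with_elements_ge_1 : Prop := ∀ (arr : List Int) (max_zero_tolerance : Int), Dom_find_max_subarray_with_elements_ge_1 arr max_zero_tolerance → Spec_find_max_subarray_with_elements_ge_1 arr max_zero_tolerance (find_max_subarray_with_elements_ge_1 arr max_zero_tolerance)

-- ===== LEMMAS AND PROOFS =====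

-- the index lists B builds, for a suffix of the array starting at position s
def badsE (t : List Int) (s : Int) : List Int :=
  ((PySem.List.enumerate t s).filter (fun p => decide (p.2 < -2))).map (fun p => p.1)
def lowsE (t : List Int) (s : Int) : List Int :=
  ((PySem.List.enumerate t s).filter (fun p => decide (-2 ≤ p.2 ∧ p.2 ≤ 0))).map (fun p => p.1)

-- low count of a bad-free block (elements ≤ 0), as an Int
def lc (u : List Int) : Int := ((u.filter (fun x => decide (x ≤ 0))).length : Int)

-- A's final max update after the loop
def finalizeA : Int × Int × Int × Int × Int → Int × Int
  | (_, ms, ml, cs, cl) => if cl > ml then (cs, cl) else (ms, ml)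

-- termination fact for the jump loop: a break below n is an element of one of the lists
theorem nextBreak_mem_of_lt (n mzt : Int) (bads lows : List Int)
    (h : nextBreak n mzt bads lows < n) :
    nextBreak n mzt bads lows ∈ bads ∨ nextBreak n mzt bads lows ∈ lows := by
  unfold nextBreak at h ⊢
  rcases le_total (bads.headD n)
      (if 0 ≤ mzt ∧ mzt < (lows.length : Int) then PySem.List.pyGetD lows mzt n else n) with hle | hle
  · rw [min_eq_left hle] at h ⊢
    left
    cases bads with
    | nil => simp at h
    | cons b t => simp
  · rw [min_eq_right hle] at h ⊢
    right
    by_cases hg : 0 ≤ mzt ∧ mzt < (lows.length : Int)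
    · rw [if_pos hg] at h ⊢
      rw [PySem.List.pyGetD_eq_getElem lows n hg.1 hg.2] at h ⊢
      exact List.getElem_mem (by omega)
    · rw [if_neg hg] at h
      omega

theorem lc_nonneg (u : List Int) : 0 ≤ lc u := by
  unfold lc; exact Int.natCast_nonneg _

theorem goB_stop (fuel : Nat) (n mzt : Int) (bads lows : List Int) (s : Int) (best : Int × Int)
    (h : nextBreak n mzt bads lows ≥ n) :
    goB (fuel + 1) n mzt bads lows s best
      = if nextBreak n mzt bads lows - s > best.2
          then (s, nextBreak n mzt bads lows - s) else best := by
  rw [goB]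
  split
  · rfl
  · exact absurd h ‹_›

theorem goB_go (fuel : Nat) (n mzt : Int) (bads lows : List Int) (s : Int) (best : Int × Int)
    (h : ¬ nextBreak n mzt bads lows ≥ n) :
    goB (fuel + 1) n mzt bads lows s best
      = goB fuel n mzt (bads.filter (fun i => decide (i ≥ nextBreak n mzt bads lows + 1)))
          (lows.filter (fun i => decide (i ≥ nextBreak n mzt bads lows + 1)))
          (nextBreak n mzt bads lows + 1)
          (if nextBreak n mzt bads lows - s > best.2
            then (s, nextBreak n mzt bads lows - s) else best) := by
  rw [goB]
  split
  · exact absurd ‹_› h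
  · rfl

theorem mem_badsE {t : List Int} {s i : Int} :
    i ∈ badsE t s ↔ ∃ (j : Nat) (hj : j < t.length), i = s + (j : Int) ∧ t[j] < -2 := by
  unfold badsE
  constructor
  · intro h
    obtain ⟨p, hp, rfl⟩ := List.mem_map.mp h
    obtain ⟨hpe, hpq⟩ := List.mem_filter.mp hp
    obtain ⟨j, hj, rfl⟩ := (PySem.List.mem_enumerate_iff _ _ _).mp hpe
    exact ⟨j, hj, rfl, by simpa using hpq⟩
  · rintro ⟨j, hj, rfl, hb⟩
    exact List.mem_map.mpr ⟨(s + j, t[j]), List.mem_filter.mpr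
      ⟨(PySem.List.mem_enumerate_iff _ _ _).mpr ⟨j, hj, rfl⟩, by simpa using hb⟩, rfl⟩

theorem mem_lowsE {t : List Int} {s i : Int} :
    i ∈ lowsE t s ↔ ∃ (j : Nat) (hj : j < t.length), i = s + (j : Int) ∧ -2 ≤ t[j] ∧ t[j] ≤ 0 := by
  unfold lowsE
  constructor
  · intro h
    obtain ⟨p, hp, rfl⟩ := List.mem_map.mp h
    obtain ⟨hpe, hpq⟩ := List.mem_filter.mp hp
    obtain ⟨j, hj, rfl⟩ := (PySem.List.mem_enumerate_iff _ _ _).mp hpe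
    exact ⟨j, hj, rfl, by simpa using hpq⟩
  · rintro ⟨j, hj, rfl, hb⟩
    exact List.mem_map.mpr ⟨(s + j, t[j]), List.mem_filter.mpr
      ⟨(PySem.List.mem_enumerate_iff _ _ _).mpr ⟨j, hj, rfl⟩, by simpa using hb⟩, rfl⟩

theorem sorted_badsE (t : List Int) (s : Int) : (badsE t s).Pairwise (· < ·) := by
  unfold badsE
  rw [List.pairwise_map]
  exact List.Pairwise.sublist (List.filter_sublist) (PySem.List.pairwise_lt_enumerate t s)

theorem sorted_lowsE (t : List Int) (s : Int) : (lowsE t s).Pairwise (· < ·) := by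
  unfold lowsE
  rw [List.pairwise_map]
  exact List.Pairwise.sublist (List.filter_sublist) (PySem.List.pairwise_lt_enumerate t s)

theorem headD_min (L : List Int) (hL : L.Pairwise (· < ·)) (d i : Int) (hi : i ∈ L) :
    L.headD d ≤ i := by
  cases L with
  | nil => simp at hi
  | cons a T =>
    rcases List.mem_cons.mp hi with rfl | h
    · simp
    · simpa using le_of_lt (List.rel_of_pairwise_cons hL h)

-- a sorted list has exactly m elements below its m-th element
theorem sorted_filter_lt_getElem (L : List Int) (hL : L.Pairwise (· < ·)) :
    ∀ (m : Nat) (hm : m < L.length), (L.filter (fun i => decide (i < L[m]))).length = m := by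
  induction L with
  | nil => intro m hm; simp at hm
  | cons a T ih =>
    intro m hm
    cases m with
    | zero =>
      have hnil : (a :: T).filter (fun i => decide (i < (a :: T)[0])) = [] := by
        rw [List.filter_eq_nil_iff]
        intro y hy
        rcases List.mem_cons.mp hy with rfl | hy
        · simp
        · have := List.rel_of_pairwise_cons hL hy
          simp only [List.getElem_cons_zero, decide_eq_true_eq]
          omega
      rw [hnil]
      rfl
    | succ m' =>
      have hm' : m' < T.length := by simpa using hm
      have hx : a < T[m'] := List.rel_of_pairwise_cons hL (List.getElem_mem hm')
      have hih := ih hL.of_cons m' hm'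
      simp only [List.getElem_cons_succ, List.filter_cons]
      rw [if_pos (by simpa using hx), List.length_cons]
      exact congrArg (fun z => z + 1) hih

-- splitting the index lists of a suffix at an inner position
theorem filtE_split (Q : Int × Int → Bool) (t : List Int) (s : Int) (k : Nat) (hk : k ≤ t.length) :
    (((PySem.List.enumerate t s).filter Q).map (fun p => p.1)).filter
        (fun i => decide (i ≥ s + (k : Int)))
      = ((PySem.List.enumerate (t.drop k) (s + (k : Int))).filter Q).map (fun p => p.1) := by
  have hlen : ((t.take k).length : Int) = (k : Int) := by
    have h2 : (t.take k).length = min k t.length := List.length_take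
    omega
  conv_lhs => rw [← List.take_append_drop k t]
  rw [PySem.List.enumerate_append, hlen, List.filter_append, List.map_append, List.filter_append]
  have h1 : (((PySem.List.enumerate (t.take k) s).filter Q).map (fun p => p.1)).filter
      (fun i => decide (i ≥ s + (k : Int))) = [] := by
    rw [List.filter_eq_nil_iff]
    intro i hi
    obtain ⟨p, hp, rfl⟩ := List.mem_map.mp hi
    obtain ⟨hpe, _⟩ := List.mem_filter.mp hp
    obtain ⟨j, hj, rfl⟩ := (PySem.List.mem_enumerate_iff _ _ _).mp hpe
    have hjk : j < k := by
      have h2 : (t.take k).length = min k t.length := List.length_take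
      omega
    simp only [decide_eq_true_eq]
    omega
  have h2 : (((PySem.List.enumerate (t.drop k) (s + (k : Int))).filter Q).map (fun p => p.1)).filter
      (fun i => decide (i ≥ s + (k : Int)))
      = ((PySem.List.enumerate (t.drop k) (s + (k : Int))).filter Q).map (fun p => p.1) := by
    rw [List.filter_eq_self]
    intro i hi
    obtain ⟨p, hp, rfl⟩ := List.mem_map.mp hi
    obtain ⟨hpe, _⟩ := List.mem_filter.mp hp
    obtain ⟨j, hj, rfl⟩ := (PySem.List.mem_enumerate_iff _ _ _).mp hpe
    simp only [decide_eq_true_eq]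
    omega
  rw [h1, h2, List.nil_append]

theorem filtE_prefix (Q : Int × Int → Bool) (t : List Int) (s : Int) (k : Nat) (hk : k ≤ t.length) :
    (((PySem.List.enumerate t s).filter Q).map (fun p => p.1)).filter
        (fun i => decide (i < s + (k : Int)))
      = ((PySem.List.enumerate (t.take k) s).filter Q).map (fun p => p.1) := by
  have hlen : ((t.take k).length : Int) = (k : Int) := by
    have h2 : (t.take k).length = min k t.length := List.length_take
    omega
  conv_lhs => rw [← List.take_append_drop k t]
  rw [PySem.List.enumerate_append, hlen, List.filter_append, List.map_append, List.filter_append]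
  have h1 : (((PySem.List.enumerate (t.take k) s).filter Q).map (fun p => p.1)).filter
      (fun i => decide (i < s + (k : Int)))
      = ((PySem.List.enumerate (t.take k) s).filter Q).map (fun p => p.1) := by
    rw [List.filter_eq_self]
    intro i hi
    obtain ⟨p, hp, rfl⟩ := List.mem_map.mp hi
    obtain ⟨hpe, _⟩ := List.mem_filter.mp hp
    obtain ⟨j, hj, rfl⟩ := (PySem.List.mem_enumerate_iff _ _ _).mp hpe
    have hjk : j < k := by
      have h2 : (t.take k).length = min k t.length := List.length_take
      omega
    simp only [decide_eq_true_eq]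
    omega
  have h2 : (((PySem.List.enumerate (t.drop k) (s + (k : Int))).filter Q).map (fun p => p.1)).filter
      (fun i => decide (i < s + (k : Int))) = [] := by
    rw [List.filter_eq_nil_iff]
    intro i hi
    obtain ⟨p, hp, rfl⟩ := List.mem_map.mp hi
    obtain ⟨hpe, _⟩ := List.mem_filter.mp hp
    obtain ⟨j, hj, rfl⟩ := (PySem.List.mem_enumerate_iff _ _ _).mp hpe
    simp only [decide_eq_true_eq]
    omega
  rw [h1, h2, List.append_nil]

-- |lowsE u s| counts the low elements of u
theorem length_lowsE (u : List Int) (s : Int) :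
    ((lowsE u s).length : Int) = ((u.filter (fun x => decide (-2 ≤ x ∧ x ≤ 0))).length : Int) := by
  unfold lowsE
  rw [List.length_map, ← List.countP_eq_length_filter, ← List.countP_eq_length_filter]
  conv_rhs => rw [← PySem.List.map_snd_enumerate u s]
  rw [List.countP_map]
  rfl

-- folding A's step across a bad-free block with enough tolerance: all take-branches
theorem seg_fold (mzt : Int) (u : List Int) : ∀ (s tol ms ml cs cl : Int),
    0 ≤ cl →
    (∀ x ∈ u, -2 ≤ x) →
    (tol < 0 ∨ lc u ≤ tol) →
    (PySem.List.enumerate u s).foldl (stepA mzt) (tol, ms, ml, cs, cl)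
      = (tol - lc u, ms, ml, if cl = 0 ∧ u ≠ [] then s else cs, cl + (u.length : Int)) := by
  induction u with
  | nil =>
    intro s tol ms ml cs cl hcl _ _
    simp [PySem.List.enumerate_nil, lc]
  | cons x v ih =>
    intro s tol ms ml cs cl hcl hge htol
    rw [PySem.List.enumerate_cons, List.foldl_cons]
    have hgx : -2 ≤ x := hge x (by simp)
    have hlenc : ((x :: v).length : Int) = (v.length : Int) + 1 := by simp
    by_cases hx1 : x ≥ 1
    · have hlc : lc (x :: v) = lc v := by
        unfold lc
        rw [List.filter_cons, if_neg (by simp only [decide_eq_true_eq]; omega)]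
      have hstep : stepA mzt (tol, ms, ml, cs, cl) (s, x)
          = (tol, ms, ml, if cl = 0 then s else cs, cl + 1) := by
        simp [stepA, hx1]
      rw [hstep, ih (s + 1) tol ms ml _ (cl + 1) (by omega)
            (fun y hy => hge y (by simp [hy]))
            (by rcases htol with h | h
                · exact Or.inl h
                · right; rw [hlc] at h; exact h),
          hlc, hlenc]
      rw [if_neg (fun hc => (show ¬ cl + 1 = 0 by omega) hc.1),
        show (if cl = 0 ∧ x :: v ≠ [] then s else cs) = (if cl = 0 then s else cs) from by simp,
        show cl + ((v.length : Int) + 1) = cl + 1 + (v.length : Int) from by ring]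
    · have hx0 : x ≤ 0 := by omega
      have hlc : lc (x :: v) = lc v + 1 := by
        unfold lc
        rw [List.filter_cons, if_pos (by simpa using hx0)]
        simp
      have htne : tol ≠ 0 := by
        rcases htol with h | h
        · omega
        · have := lc_nonneg v
          rw [hlc] at h
          omega
      have hstep : stepA mzt (tol, ms, ml, cs, cl) (s, x)
          = (tol - 1, ms, ml, if cl = 0 then s else cs, cl + 1) := by
        simp [stepA, hx1, hgx, htne]
      rw [hstep, ih (s + 1) (tol - 1) ms ml _ (cl + 1) (by omega)
            (fun y hy => hge y (by simp [hy]))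
            (by rcases htol with h | h
                · left; omega
                · right; rw [hlc] at h; omega),
          hlc, hlenc]
      rw [if_neg (fun hc => (show ¬ cl + 1 = 0 by omega) hc.1),
        show (if cl = 0 ∧ x :: v ≠ [] then s else cs) = (if cl = 0 then s else cs) from by simp,
        show cl + ((v.length : Int) + 1) = cl + 1 + (v.length : Int) from by ring,
        show tol - (lc v + 1) = tol - 1 - lc v from by ring]

-- the main loop invariant: running A from a fresh segment state at position s
-- computes exactly B's jump loop over the index lists of the suffix
theorem mainL (mzt : Int) : ∀ (N : Nat) (t : List Int) (s ms ml cs : Int) (fuel : Nat),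
    t.length ≤ N → 0 ≤ ml →
    (badsE t s).length + (lowsE t s).length < fuel →
    finalizeA ((PySem.List.enumerate t s).foldl (stepA mzt) (mzt, ms, ml, cs, 0))
      = goB fuel (s + (t.length : Int)) mzt (badsE t s) (lowsE t s) s (ms, ml) := by
  intro N
  induction N with
  | zero =>
    intro t s ms ml cs fuel hlen hml hfuel
    cases t with
    | cons a u => simp at hlen
    | nil =>
      have hbE : badsE [] s = [] := by unfold badsE; rw [PySem.List.enumerate_nil]; rfl
      have hlE : lowsE [] s = [] := by unfold lowsE; rw [PySem.List.enumerate_nil]; rfl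
      rw [hbE, hlE] at hfuel ⊢
      rw [PySem.List.enumerate_nil]
      obtain ⟨f, rfl⟩ : ∃ f, fuel = f + 1 := ⟨fuel - 1, by omega⟩
      have hnb : nextBreak (s + ((([] : List Int)).length : Int)) mzt [] [] =
          s + ((([] : List Int)).length : Int) := by
        unfold nextBreak
        rw [if_neg (by rintro ⟨h1, h2⟩; simp at h2; omega)]
        simp
      rw [goB_stop f _ _ _ _ _ _ (by rw [hnb])]
      rw [hnb]
      simp only [List.foldl_nil, finalizeA, List.length_nil]
      rw [if_neg (show ¬ ((0 : Int) > ml) by omega),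
        if_neg (show ¬ (s + ((0 : Nat) : Int) - s > (ms, ml).2) from by
          show ¬ (s + ((0 : Nat) : Int) - s > ml); omega)]
  | succ N ih =>
    intro t s ms ml cs fuel hlen hml hfuel
    obtain ⟨f, rfl⟩ : ∃ f, fuel = f + 1 := ⟨fuel - 1, by omega⟩
    obtain ⟨n, hn⟩ : ∃ n : Int, n = s + (t.length : Int) := ⟨_, rfl⟩
    rw [← hn]
    obtain ⟨e, he⟩ : ∃ e : Int, e = nextBreak n mzt (badsE t s) (lowsE t s) := ⟨_, rfl⟩
    have hrangeb : ∀ i ∈ badsE t s, s ≤ i ∧ i < n := by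
      intro i hi
      obtain ⟨j, hj, rfl, _⟩ := mem_badsE.mp hi
      omega
    have hrangel : ∀ i ∈ lowsE t s, s ≤ i ∧ i < n := by
      intro i hi
      obtain ⟨j, hj, rfl, _⟩ := mem_lowsE.mp hi
      omega
    have hminb : e ≤ (badsE t s).headD n := by
      rw [he]; unfold nextBreak; exact min_le_left _ _
    have hbound : s ≤ e ∧ e ≤ n := by
      rw [he]
      unfold nextBreak
      have hnb : s ≤ (badsE t s).headD n ∧ (badsE t s).headD n ≤ n := by
        cases hB : badsE t s with
        | nil => simp only [List.headD_nil]; omega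
        | cons a T =>
          have ha : a ∈ badsE t s := by rw [hB]; exact List.mem_cons_self
          have := hrangeb a ha
          simp only [List.headD_cons]
          omega
      have hnl : s ≤ (if 0 ≤ mzt ∧ mzt < ((lowsE t s).length : Int)
            then PySem.List.pyGetD (lowsE t s) mzt n else n)
          ∧ (if 0 ≤ mzt ∧ mzt < ((lowsE t s).length : Int)
            then PySem.List.pyGetD (lowsE t s) mzt n else n) ≤ n := by
        by_cases hg : 0 ≤ mzt ∧ mzt < ((lowsE t s).length : Int)
        · rw [if_pos hg, PySem.List.pyGetD_eq_getElem (lowsE t s) n hg.1 hg.2]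
          have hlt : mzt.toNat < (lowsE t s).length := by omega
          have := hrangel _ (List.getElem_mem hlt)
          omega
        · rw [if_neg hg]; omega
      constructor
      · exact le_min hnb.1 hnl.1
      · exact le_trans (min_le_left _ _) hnb.2
    obtain ⟨hse, hen⟩ := hbound
    obtain ⟨k, hkk⟩ : ∃ k : Nat, k = (e - s).toNat := ⟨_, rfl⟩
    have hk : (k : Int) = e - s := by rw [hkk]; exact Int.toNat_of_nonneg (by omega)
    have hkle : k ≤ t.length := by omega
    -- no bad element strictly inside the segment [s, e)
    have hnobad : ∀ x ∈ t.take k, -2 ≤ x := by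
      intro x hx
      obtain ⟨j, hjlen, rfl⟩ := List.mem_iff_getElem.mp hx
      have h2 : (t.take k).length = min k t.length := List.length_take
      have hjk : j < k := by omega
      have hjt : j < t.length := by omega
      rw [List.getElem_take]
      by_contra hc
      have hmem : s + (j : Int) ∈ badsE t s := mem_badsE.mpr ⟨j, hjt, rfl, by omega⟩
      have hle2 : (badsE t s).headD n ≤ s + (j : Int) :=
        headD_min _ (sorted_badsE t s) _ _ hmem
      omega
    -- lc of the segment equals the number of lowsE entries below e
    have hlceq : lc (t.take k)
        = (((lowsE t s).filter (fun i => decide (i < s + (k : Int)))).length : Int) := by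
      unfold lowsE
      rw [filtE_prefix (fun p => decide (-2 ≤ p.2 ∧ p.2 ≤ 0)) t s k hkle]
      have h1 := length_lowsE (t.take k) s
      unfold lowsE at h1
      rw [h1]
      unfold lc
      have h2 : (t.take k).filter (fun x => decide (-2 ≤ x ∧ x ≤ 0))
          = (t.take k).filter (fun x => decide (x ≤ 0)) :=
        List.filter_congr (fun x hx => by
          simp only [decide_eq_decide]
          exact ⟨fun h => h.2, fun h => ⟨hnobad x hx, h⟩⟩)
      rw [h2]
    -- tolerance condition for the segment
    have htolcond : mzt < 0 ∨ lc (t.take k) ≤ mzt := by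
      by_cases hm0 : 0 ≤ mzt
      · right
        by_cases hg : mzt < ((lowsE t s).length : Int)
        · have hlt : mzt.toNat < (lowsE t s).length := by omega
          have hnl : e ≤ (lowsE t s)[mzt.toNat] := by
            rw [he]; unfold nextBreak
            rw [if_pos ⟨hm0, hg⟩, PySem.List.pyGetD_eq_getElem (lowsE t s) n hm0 hg]
            exact min_le_right _ _
          have hcnt := sorted_filter_lt_getElem (lowsE t s) (sorted_lowsE t s) mzt.toNat hlt
          rw [hlceq]
          have hmono : ((lowsE t s).filter (fun i => decide (i < s + (k : Int)))).length
              ≤ ((lowsE t s).filter (fun i => decide (i < (lowsE t s)[mzt.toNat]))).length := by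
            rw [← List.countP_eq_length_filter, ← List.countP_eq_length_filter]
            apply List.countP_mono_left
            intro x _ hx
            simp only [decide_eq_true_eq] at hx ⊢
            omega
          omega
        · rw [hlceq]
          have := List.length_filter_le (fun i => decide (i < s + (k : Int))) (lowsE t s)
          omega
      · left; omega
    by_cases hcase : e ≥ n
    · -- last segment runs to the end of the array
      have hkl : k = t.length := by omega
      have htake : t.take k = t := by rw [hkl]; exact List.take_length
      rw [htake] at hnobad htolcond
      rw [seg_fold mzt t s mzt ms ml cs 0 le_rfl hnobad htolcond]
      simp only [true_and]
      rw [goB_stop f _ _ _ _ _ _ (by rw [← he]; exact hcase)]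
      rw [← he]
      simp only [finalizeA]
      by_cases hgt : (0 : Int) + (t.length : Int) > ml
      · have htne : t ≠ [] := by
          intro hcontra
          subst hcontra
          simp at hgt
          omega
        rw [if_pos hgt, if_pos htne,
          if_pos (show e - s > (ms, ml).2 from by show e - s > ml; omega),
          show (0 : Int) + (t.length : Int) = e - s from by omega]
      · rw [if_neg hgt,
          if_neg (show ¬ (e - s > (ms, ml).2) from by show ¬ (e - s > ml); omega)]
    · -- the segment ends at break position e < n, recurse past it
      have hkn : k < t.length := by omega
      have hlent : ((t.take k).length : Int) = (k : Int) := by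
        have h2 : (t.take k).length = min k t.length := List.length_take
        omega
      have henum : PySem.List.enumerate t s
          = PySem.List.enumerate (t.take k) s
            ++ ((s + (k : Int), t[k]) :: PySem.List.enumerate (t.drop (k + 1)) (s + (k : Int) + 1)) := by
        conv_lhs => rw [← List.take_append_drop k t]
        rw [PySem.List.enumerate_append, hlent, ← List.getElem_cons_drop hkn,
          PySem.List.enumerate_cons]
      rw [henum, List.foldl_append,
        seg_fold mzt (t.take k) s mzt ms ml cs 0 le_rfl hnobad htolcond, List.foldl_cons, hlent]
      simp only [true_and]
      -- the break branch fires at position e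
      have hbr : t[k] < -2 ∨ (t[k] ≤ 0 ∧ mzt - lc (t.take k) = 0) := by
        rcases le_or_gt ((badsE t s).headD n)
            (if 0 ≤ mzt ∧ mzt < ((lowsE t s).length : Int)
              then PySem.List.pyGetD (lowsE t s) mzt n else n) with h1 | h1
        · -- break at a bad element
          have heb : e = (badsE t s).headD n := by
            rw [he]; unfold nextBreak; exact min_eq_left h1
          left
          cases hB : badsE t s with
          | nil =>
            rw [hB] at heb
            simp only [List.headD_nil] at heb
            omega
          | cons a T =>
            have ha : a ∈ badsE t s := by rw [hB]; exact List.mem_cons_self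
            obtain ⟨j, hj, hjeq, hbad⟩ := mem_badsE.mp ha
            rw [hB] at heb
            simp only [List.headD_cons] at heb
            have hjk : k = j := by omega
            subst hjk
            exact hbad
        · -- break at the tolerance-exhausting low element
          have hel : e = (if 0 ≤ mzt ∧ mzt < ((lowsE t s).length : Int)
              then PySem.List.pyGetD (lowsE t s) mzt n else n) := by
            rw [he]; unfold nextBreak; exact min_eq_right (le_of_lt h1)
          by_cases hg : 0 ≤ mzt ∧ mzt < ((lowsE t s).length : Int)
          · rw [if_pos hg, PySem.List.pyGetD_eq_getElem (lowsE t s) n hg.1 hg.2] at hel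
            right
            have hlt : mzt.toNat < (lowsE t s).length := by omega
            have hmem := List.getElem_mem hlt
            obtain ⟨j, hj, hjeq, hlow1, hlow2⟩ := mem_lowsE.mp hmem
            have hjk : k = j := by omega
            subst hjk
            refine ⟨hlow2, ?_⟩
            have hcnt := sorted_filter_lt_getElem (lowsE t s) (sorted_lowsE t s) mzt.toNat hlt
            have hfe : (lowsE t s).filter (fun i => decide (i < s + (k : Int)))
                = (lowsE t s).filter (fun i => decide (i < (lowsE t s)[mzt.toNat])) :=
              List.filter_congr (fun x _ => by
                have hsk : s + (k : Int) = (lowsE t s)[mzt.toNat] := by omega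
                rw [hsk])
            rw [hlceq, hfe, hcnt]
            omega
          · rw [if_neg hg] at hel
            omega
      have hc1 : ¬ (t[k] ≥ 1) := by rcases hbr with h | ⟨h, _⟩ <;> omega
      have hc2 : ¬ (t[k] ≥ -2 ∧ mzt - lc (t.take k) ≠ 0) := by
        rcases hbr with h | ⟨h1, h2⟩
        · rintro ⟨hh, _⟩; omega
        · rintro ⟨_, hh⟩; exact hh h2
      have hstep : stepA mzt (mzt - lc (t.take k), ms, ml,
            (if t.take k ≠ [] then s else cs), 0 + (k : Int)) (s + (k : Int), t[k])
          = (mzt,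
             if 0 + (k : Int) > ml then (if t.take k ≠ [] then s else cs) else ms,
             if 0 + (k : Int) > ml then 0 + (k : Int) else ml,
             (if t.take k ≠ [] then s else cs), 0) := by
        dsimp only [stepA]
        rw [if_neg hc1, if_neg hc2]
      have hd : (t.drop (k + 1)).length = t.length - (k + 1) := List.length_drop
      have hrest : (t.drop (k + 1)).length ≤ N := by omega
      have hml' : 0 ≤ (if 0 + (k : Int) > ml then 0 + (k : Int) else ml) := by
        split_ifs <;> omega
      have hfb : (badsE t s).filter (fun i => decide (i ≥ e + 1))
          = badsE (t.drop (k + 1)) (s + (k : Int) + 1) := by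
        have hsp := filtE_split (fun p => decide (p.2 < -2)) t s (k + 1) (by omega)
        unfold badsE
        have hpe : (fun i => decide (i ≥ e + 1))
            = (fun i => decide (i ≥ s + ((k + 1 : Nat) : Int))) := by
          funext i
          have hv : e + 1 = s + ((k + 1 : Nat) : Int) := by push_cast; omega
          rw [hv]
        rw [hpe, hsp]
        have hv2 : s + ((k + 1 : Nat) : Int) = s + (k : Int) + 1 := by push_cast; ring
        rw [hv2]
      have hfl : (lowsE t s).filter (fun i => decide (i ≥ e + 1))
          = lowsE (t.drop (k + 1)) (s + (k : Int) + 1) := by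
        have hsp := filtE_split (fun p => decide (-2 ≤ p.2 ∧ p.2 ≤ 0)) t s (k + 1) (by omega)
        unfold lowsE
        have hpe : (fun i => decide (i ≥ e + 1))
            = (fun i => decide (i ≥ s + ((k + 1 : Nat) : Int))) := by
          funext i
          have hv : e + 1 = s + ((k + 1 : Nat) : Int) := by push_cast; omega
          rw [hv]
        rw [hpe, hsp]
        have hv2 : s + ((k + 1 : Nat) : Int) = s + (k : Int) + 1 := by push_cast; ring
        rw [hv2]
      -- enough fuel remains: the break index e leaves one of the two lists
      have hfuel' : (badsE (t.drop (k + 1)) (s + (k : Int) + 1)).length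
          + (lowsE (t.drop (k + 1)) (s + (k : Int) + 1)).length < f := by
        have hb1 : ((badsE t s).filter (fun i => decide (i ≥ e + 1))).length
            ≤ (badsE t s).length := List.length_filter_le _ _
        have hl1 : ((lowsE t s).filter (fun i => decide (i ≥ e + 1))).length
            ≤ (lowsE t s).length := List.length_filter_le _ _
        have hmem := nextBreak_mem_of_lt n mzt (badsE t s) (lowsE t s) (by omega)
        rw [← he] at hmem
        rcases hmem with hm | hm
        · have hb2 : ((badsE t s).filter (fun i => decide (i ≥ e + 1))).length
              < (badsE t s).length :=
            List.length_filter_lt_length_iff_exists.mpr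
              ⟨e, hm, by simp only [decide_eq_true_eq]; omega⟩
          rw [← hfb, ← hfl]
          omega
        · have hl2 : ((lowsE t s).filter (fun i => decide (i ≥ e + 1))).length
              < (lowsE t s).length :=
            List.length_filter_lt_length_iff_exists.mpr
              ⟨e, hm, by simp only [decide_eq_true_eq]; omega⟩
          rw [← hfb, ← hfl]
          omega
      have hih := ih (t.drop (k + 1)) (s + (k : Int) + 1)
        (if 0 + (k : Int) > ml then (if t.take k ≠ [] then s else cs) else ms)
        (if 0 + (k : Int) > ml then 0 + (k : Int) else ml)
        (if t.take k ≠ [] then s else cs) f hrest hml' hfuel'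
      have hnn : (s + (k : Int) + 1) + ((t.drop (k + 1)).length : Int) = n := by omega
      rw [hnn] at hih
      refine Eq.trans (congrArg (fun st => finalizeA (List.foldl (stepA mzt) st
        (PySem.List.enumerate (t.drop (k + 1)) (s + (k : Int) + 1)))) hstep) (Eq.trans hih ?_)
      rw [goB_go f n mzt (badsE t s) (lowsE t s) s (ms, ml) (by rw [← he]; exact hcase)]
      simp only [← he]
      have hbest : (if e - s > (ms, ml).2 then (s, e - s) else (ms, ml))
          = (if 0 + (k : Int) > ml then (if t.take k ≠ [] then s else cs) else ms,
             if 0 + (k : Int) > ml then 0 + (k : Int) else ml) := by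
        have hms2 : (ms, ml).2 = ml := rfl
        rw [hms2]
        by_cases hgt : 0 + (k : Int) > ml
        · have hkpos : 0 < k := by omega
          have htne : t.take k ≠ [] := by
            intro hcontra
            have h10 : (t.take k).length = 0 := by rw [hcontra]; rfl
            rw [List.length_take] at h10
            omega
          rw [if_pos (show e - s > ml from by omega),
            if_pos hgt, if_pos hgt, if_pos htne,
            show e - s = 0 + (k : Int) from by omega]
        · rw [if_neg (show ¬ (e - s > ml) from by omega),
            if_neg hgt, if_neg hgt]
      rw [hfb, hfl, hbest]
      have hs1 : e + 1 = s + (k : Int) + 1 := by omega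
      rw [hs1]

-- ===== VERDICT (by name: the statement is the Claim_ definition above) =====
theorem find_max_subarray_with_elements_ge_1_spec : Claim_equal_find_max_subarray_with_elements_ge_1 := by
  intro arr mzt _
  unfold Spec_find_max_subarray_with_elements_ge_1
  unfold find_max_subarray_with_elements_ge_1 find_max_subarray_with_elements_ge_1_alt
  have h := mainL mzt arr.length arr 0 0 0 0
    ((badsE arr 0).length + (lowsE arr 0).length + 1) le_rfl le_rfl (by omega)
  rw [zero_add] at h
  have hbb : badsE arr 0
      = ((PySem.List.enumerate arr).filter (fun p => decide (p.2 < -2))).map (fun p => p.1) := rfl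
  have hll : lowsE arr 0
      = ((PySem.List.enumerate arr).filter
          (fun p => decide (-2 ≤ p.2 ∧ p.2 ≤ 0))).map (fun p => p.1) := rfl
  rw [hbb, hll] at h
  dsimp only
  rcases hA : (PySem.List.enumerate arr).foldl (stepA mzt) (mzt, 0, 0, 0, 0)
    with ⟨tol, ms, ml, cs, cl⟩
  rw [hA] at h
  simp only [finalizeA] at h
  rw [← h]
  by_cases hgt : cl > ml
  · simp [hgt]
  · simp [hgt]
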